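-- pv_equiv track=rewrite | github.com/aditya-hari/multilingual-rdf-to-text | data_augmentation/preprocessing/filter_by_category.py | merge_sentences_with_open_brackets
-- ===== SOURCE A (Python) =====
-- def merge_sentences_with_open_brackets(sentences):
--     merged_sentences = []
--     current_sentence = ""
--
--     for sentence in sentences:
--         current_sentence += sentence
--         open_count = current_sentence.count("(")
--         close_count = current_sentence.count(")")
--
--         if open_count == close_count:
--             merged_sentences.append(current_sentence)
--             current_sentence = ""
--
--     return merged_sentences
-- ===== SOURCE B (Python) =====
-- def merge_sentences_with_open_brackets(sentences):
--     # pass 1: compute the lengths of the balanced groups (a trailing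
--     # unbalanced tail contributes no length and is dropped, as in A)
--     lengths = []
--     run = 0
--     bal = 0
--     for s in sentences:
--         run += 1
--         bal += s.count("(") - s.count(")")
--         if bal == 0:
--             lengths.append(run)
--             run = 0
--     # pass 2: cut the original list into blocks of those lengths, join each
--     out = []
--     start = 0
--     for k in lengths:
--         out.append("".join(sentences[start:start + k]))
--         start += k
--     return out
-- ===== Notes on version B (the rewrite author's own statement) =====
-- stated objective: alternative
-- what changed: B is a staged two-pass algorithm: pass 1 computes only the lengths of the balanced groups from per-sentence parenthesis deltas (no string building), pass 2 splits the original list into blocks of those lengths and joins each block once; A instead grows one string buffer and re-counts '(' and ')' over the whole buffer after every append.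
import Mathlib
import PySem

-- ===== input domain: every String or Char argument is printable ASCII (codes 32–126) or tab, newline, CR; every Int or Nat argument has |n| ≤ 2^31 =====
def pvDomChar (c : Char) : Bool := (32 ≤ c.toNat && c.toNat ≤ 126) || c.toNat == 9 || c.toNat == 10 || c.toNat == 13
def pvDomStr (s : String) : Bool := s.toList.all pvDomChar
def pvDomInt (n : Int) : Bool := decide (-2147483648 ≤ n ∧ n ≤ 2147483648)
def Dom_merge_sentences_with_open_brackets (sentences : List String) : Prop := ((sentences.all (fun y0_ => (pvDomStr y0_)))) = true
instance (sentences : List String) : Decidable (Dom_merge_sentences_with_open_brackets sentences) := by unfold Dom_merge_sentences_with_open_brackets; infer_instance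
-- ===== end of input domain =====

-- B replaces A's single pass (grow a string buffer, re-count '(' / ')' over the whole buffer
-- after every append) by two staged passes: first compute the balanced-group LENGTHS from
-- per-sentence deltas, then split the original list into blocks of those lengths and join each.

-- ===== PORT A =====
-- state: (merged_sentences, current_sentence as List Char); counts recomputed over the whole
-- accumulated string each step, as in A ('s.count("(")' for a 1-char needle is List.count)
def merge_sentences_with_open_brackets (sentences : List String) : List String :=
  (sentences.foldl
    (fun (st : List String × List Char) s =>
      let cur := st.2 ++ s.toList
      let open_count := cur.count '('
      let close_count := cur.count ')'
      if open_count = close_count then (st.1 ++ [String.ofList cur], []) else (st.1, cur))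
    ([], [])).1

-- ===== PORT B =====
-- pass 1: fold with state (lengths, run, bal); pass 2: fold over lengths with state (out, start),
-- sentences[start:start+k] = PySem.List.slice, "".join = PySem.Str.join ""
def merge_sentences_with_open_brackets_alt (sentences : List String) : List String :=
  let lengths := (sentences.foldl
      (fun (st : List Int × Int × Int) s =>
        let run := st.2.1 + 1
        let bal := st.2.2 + (s.toList.count '(' : Int) - (s.toList.count ')' : Int)
        if bal = 0 then (st.1 ++ [run], 0, 0) else (st.1, run, bal))
      ([], 0, 0)).1
  (lengths.foldl
      (fun (st : List String × Int) k =>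
        (st.1 ++ [PySem.Str.join "" (PySem.List.slice sentences (some st.2) (some (st.2 + k)))],
         st.2 + k))
      ([], 0)).1

-- ===== PRECONDITION & SPEC =====
def Spec_merge_sentences_with_open_brackets (sentences : List String) (out : List String) : Prop := out = merge_sentences_with_open_brackets_alt sentences
instance (sentences : List String) (out : List String) : Decidable (Spec_merge_sentences_with_open_brackets sentences out) := by unfold Spec_merge_sentences_with_open_brackets; infer_instance

-- ===== CLAIM =====
def Claim_equal_merge_sentences_with_open_brackets : Prop := ∀ (sentences : List String), Dom_merge_sentences_with_open_brackets sentences → Spec_merge_sentences_with_open_brackets sentences (merge_sentences_with_open_brackets sentences)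

-- ===== LEMMAS AND PROOFS =====

-- per-sentence parenthesis delta
def mswobDelta (s : String) : Int := (s.toList.count '(' : Int) - (s.toList.count ')' : Int)

-- reference recursion: the merged groups, given running balance and pending characters
def mswobGroups : List String → Int → List Char → List String
  | [], _, _ => []
  | s :: t, bal, cur =>
    if bal + mswobDelta s = 0 then String.ofList (cur ++ s.toList) :: mswobGroups t 0 []
    else mswobGroups t (bal + mswobDelta s) (cur ++ s.toList)

-- reference recursion: the group lengths, given running balance and current run length
def mswobLens : List String → Int → Int → List Int
  | [], _, _ => []
  | s :: t, bal, run =>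
    if bal + mswobDelta s = 0 then (run + 1) :: mswobLens t 0 0
    else mswobLens t (bal + mswobDelta s) (run + 1)

-- A's fold produces mswobGroups
theorem mswob_A_eq (rest : List String) (merged : List String) (cur : List Char) (bal : Int)
    (hbal : bal = (cur.count '(' : Int) - (cur.count ')' : Int)) :
    (rest.foldl
      (fun (st : List String × List Char) s =>
        let cur := st.2 ++ s.toList
        let open_count := cur.count '('
        let close_count := cur.count ')'
        if open_count = close_count then (st.1 ++ [String.ofList cur], []) else (st.1, cur))
      (merged, cur)).1 = merged ++ mswobGroups rest bal cur := by
  induction rest generalizing merged cur bal with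
  | nil => simp [mswobGroups]
  | cons s t ih =>
    simp only [List.foldl_cons, mswobGroups]
    have hd : bal + mswobDelta s
        = ((cur ++ s.toList).count '(' : Int) - ((cur ++ s.toList).count ')' : Int) := by
      simp [mswobDelta, List.count_append, hbal]; ring
    by_cases h : (cur ++ s.toList).count '(' = (cur ++ s.toList).count ')'
    · have hb0 : bal + mswobDelta s = 0 := by rw [hd]; omega
      simp only [h, hb0, if_true]
      rw [ih (merged ++ [String.ofList (cur ++ s.toList)]) [] 0 (by simp)]
      simp
    · have hbne : ¬ bal + mswobDelta s = 0 := by rw [hd]; omega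
      simp only [if_neg h, if_neg hbne]
      exact ih merged (cur ++ s.toList) _ hd

-- B's pass 1 produces mswobLens
theorem mswob_lens_eq (rest : List String) (acc : List Int) (run bal : Int) :
    (rest.foldl
      (fun (st : List Int × Int × Int) s =>
        let run := st.2.1 + 1
        let bal := st.2.2 + (s.toList.count '(' : Int) - (s.toList.count ')' : Int)
        if bal = 0 then (st.1 ++ [run], 0, 0) else (st.1, run, bal))
      (acc, run, bal)).1 = acc ++ mswobLens rest bal run := by
  induction rest generalizing acc run bal with
  | nil => simp [mswobLens]
  | cons s t ih =>
    simp only [List.foldl_cons, mswobLens]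
    have harr : bal + (s.toList.count '(' : Int) - (s.toList.count ')' : Int)
        = bal + mswobDelta s := by simp [mswobDelta]; ring
    by_cases h : bal + mswobDelta s = 0
    · simp only [harr, if_pos h]
      rw [ih (acc ++ [run + 1]) 0 0]; simp
    · simp only [harr, if_neg h]
      exact ih acc (run + 1) _

-- sep-'' join is flatten
theorem mswob_join_flatten (l : List (List Char)) : PySem.Chars.join [] l = l.flatten := by
  induction l with
  | nil => simp [PySem.Chars.join_nil]
  | cons p t ih =>
    cases t with
    | nil => simp [PySem.Chars.join_singleton]
    | cons q r => rw [PySem.Chars.join_cons_cons]; simp_all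

-- B's pass 2 over mswobLens produces mswobGroups
theorem mswob_pass2_eq (full : List String) (rest : List String) (bal : Int)
    (done0 pre : List String) (out : List String) (hfull : full = done0 ++ pre ++ rest) :
    ((mswobLens rest bal (pre.length : Int)).foldl
      (fun (st : List String × Int) k =>
        (st.1 ++ [PySem.Str.join "" (PySem.List.slice full (some st.2) (some (st.2 + k)))],
         st.2 + k))
      (out, (done0.length : Int))).1
      = out ++ mswobGroups rest bal (pre.map String.toList).flatten := by
  induction rest generalizing bal done0 pre out with
  | nil => simp [mswobLens, mswobGroups]
  | cons s t ih =>
    simp only [mswobLens, mswobGroups]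
    by_cases h : bal + mswobDelta s = 0
    · simp only [if_pos h, List.foldl_cons]
      have hb : (done0.length : Int) + ((pre.length : Int) + 1)
          = ((done0.length + (pre.length + 1) : Nat) : Int) := by push_cast; ring
      have hslice : PySem.List.slice full (some (done0.length : Int))
            (some ((done0.length : Int) + ((pre.length : Int) + 1))) = pre ++ [s] := by
        rw [hb, PySem.List.slice_natCast, hfull, Nat.add_sub_cancel_left,
          show done0 ++ pre ++ s :: t = done0 ++ ((pre ++ [s]) ++ t) by simp,
          List.drop_left' rfl, List.take_left' (by simp)]
      have hjoin : PySem.Str.join "" (pre ++ [s])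
          = String.ofList ((pre.map String.toList).flatten ++ s.toList) := by
        rw [← String.toList_inj, PySem.Str.toList_join]
        simp [mswob_join_flatten]
      rw [hslice, hjoin]
      have harg : (done0.length : Int) + ((pre.length : Int) + 1)
          = (((done0 ++ pre ++ [s]).length : Nat) : Int) := by simp
      rw [harg]
      have := ih 0 (done0 ++ pre ++ [s]) []
        (out ++ [String.ofList ((pre.map String.toList).flatten ++ s.toList)]) (by simp [hfull])
      simpa using this
    · simp only [if_neg h]
      have := ih (bal + mswobDelta s) done0 (pre ++ [s]) out (by simp [hfull])
      simp only [List.length_append, List.map_append, List.flatten_append] at this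
      have harg : ((pre.length + 1 : Nat) : Int) = (pre.length : Int) + 1 := by push_cast; ring
      simpa [harg] using this

-- ===== VERDICT =====
theorem merge_sentences_with_open_brackets_spec : Claim_equal_merge_sentences_with_open_brackets := by
  intro sentences _
  unfold Spec_merge_sentences_with_open_brackets merge_sentences_with_open_brackets merge_sentences_with_open_brackets_alt
  rw [mswob_A_eq sentences [] [] 0 (by simp)]
  rw [mswob_lens_eq sentences [] 0 0]
  have h := mswob_pass2_eq sentences sentences 0 [] [] [] rfl
  simp only [List.length_nil, Nat.cast_zero, List.nil_append, List.map_nil, List.flatten_nil] at h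
  exact h.symm
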